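-- pv_equiv track=rewrite | github.com/postech-di-lab/METIS | modeling-component-layer/text-modeling-component/src/clrcmd/data/data.py | create_perfect_overlap_pairs_from_tokens
-- ===== SOURCE A (Python) =====
-- import itertools
-- from typing import List, Tuple
--
-- Pair = Tuple[int, int]
--
-- def create_intervals(tokens: List[str]) -> List[Pair]:
--     start_pos = itertools.accumulate(map(len, tokens), initial=0)
--     length = map(len, tokens)
--     return list(map(lambda x: (x[0], x[0] + x[1]), zip(start_pos, length)))
--
-- def create_perfect_overlap_pairs_from_intervals(
--     intervals1: List[Pair], intervals2: List[Pair]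
-- ) -> List[Tuple[Pair, Pair]]:
--     pipeline = itertools.product(intervals1, intervals2)
--     pipeline = filter(lambda x: x[0] == x[1], pipeline)
--     return list(pipeline)
--
-- def create_perfect_overlap_pairs_from_tokens(
--     tokens1: List[str], tokens2: List[str]
-- ) -> List[Tuple[int, int]]:
--     intervals1 = create_intervals(tokens1)
--     intervals2 = create_intervals(tokens2)
--     # NOTE: Due to the special token, the index starts with 1
--     interval2idx1 = {x: i for i, x in enumerate(intervals1, start=1)}
--     interval2idx2 = {x: i for i, x in enumerate(intervals2, start=1)}
--     pairs = create_perfect_overlap_pairs_from_intervals(intervals1, intervals2)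
--     # Index pair
--     pairs = [(interval2idx1[x], interval2idx2[y]) for x, y in pairs]
--     return pairs
-- ===== SOURCE B (Python) =====
-- def create_perfect_overlap_pairs_from_tokens(tokens1, tokens2):
--     def intervals(tokens):
--         out, pos = [], 0
--         for t in tokens:
--             end = pos + len(t)
--             out.append((pos, end))
--             pos = end
--         return out
--
--     iv1 = intervals(tokens1)
--     iv2 = intervals(tokens2)
--     # index of the LAST occurrence of each interval, 1-based (as A's dicts)
--     idx1 = {x: i for i, x in enumerate(iv1, start=1)}
--     idx2 = {x: i for i, x in enumerate(iv2, start=1)}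
--     # multiplicity of each interval in iv2
--     cnt2 = {}
--     for y in iv2:
--         cnt2[y] = cnt2.get(y, 0) + 1
--     out = []
--     for x in iv1:
--         c = cnt2.get(x, 0)
--         if c:
--             out.extend([(idx1[x], idx2[x])] * c)
--     return out
-- ===== Notes on version B (the rewrite author's own statement) =====
-- stated objective: faster
-- what changed: Replaces the O(n*m) cartesian-product-plus-filter over the two interval lists with a hash count of intervals2 and a single pass over intervals1 emitting each matching index pair with its multiplicity; intervals are built by a running-position loop instead of accumulate/zip/map.
import Mathlib
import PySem

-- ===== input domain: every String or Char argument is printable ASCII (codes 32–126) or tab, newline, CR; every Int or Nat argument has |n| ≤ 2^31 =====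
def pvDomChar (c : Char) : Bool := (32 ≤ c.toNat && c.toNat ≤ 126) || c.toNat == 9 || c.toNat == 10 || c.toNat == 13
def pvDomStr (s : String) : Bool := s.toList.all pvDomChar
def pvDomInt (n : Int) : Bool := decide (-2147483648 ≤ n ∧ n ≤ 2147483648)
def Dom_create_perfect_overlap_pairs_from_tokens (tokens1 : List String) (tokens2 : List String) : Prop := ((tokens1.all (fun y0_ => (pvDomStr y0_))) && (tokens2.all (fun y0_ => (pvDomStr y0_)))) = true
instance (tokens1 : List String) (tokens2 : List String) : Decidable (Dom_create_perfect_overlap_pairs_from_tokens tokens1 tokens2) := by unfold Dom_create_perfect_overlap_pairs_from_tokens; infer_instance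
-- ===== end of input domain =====

-- B: counts intervals2 in a dict and scans intervals1 once (O(n+m)) instead of A's O(n*m) product+filter; same return value.


-- ===== PORT A =====
-- create_intervals: itertools.accumulate(map(len, tokens), initial=0) is scanl (+) 0 over the lengths;
-- zip truncates to the shorter list exactly as Python's zip does.
def pvIntervalsA (tokens : List String) : List (Int × Int) :=
  let lens : List Int := tokens.map (fun t => PySem.Str.len t)
  let start_pos : List Int := lens.scanl (· + ·) 0
  (start_pos.zip lens).map (fun x => (x.1, x.1 + x.2))

-- {x: i for i, x in enumerate(intervals, start=1)}  (used verbatim by both Pythons)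
def pvIdxDict (iv : List (Int × Int)) : PySem.Dict (Int × Int) Int :=
  (PySem.List.enumerate iv 1).foldl (fun d p => d.insert p.2 p.1) PySem.Dict.empty

-- interval2idx[x] can never raise KeyError (x is drawn from the dict's key list), so getD is exact here.
def create_perfect_overlap_pairs_from_tokens (tokens1 : List String) (tokens2 : List String) : List (Int × Int) :=
  let intervals1 := pvIntervalsA tokens1
  let intervals2 := pvIntervalsA tokens2
  let interval2idx1 := pvIdxDict intervals1
  let interval2idx2 := pvIdxDict intervals2
  -- create_perfect_overlap_pairs_from_intervals: product, then filter x[0] == x[1]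
  let pairs := (intervals1.flatMap (fun a => intervals2.map (fun b => (a, b)))).filter
      (fun x => x.1 == x.2)
  pairs.map (fun p => (interval2idx1.getD p.1 0, interval2idx2.getD p.2 0))

-- ===== PORT B =====
-- running-position loop building the intervals
def pvIntervalsB (tokens : List String) : List (Int × Int) :=
  (tokens.foldl (fun (st : List (Int × Int) × Int) t =>
      let e := st.2 + PySem.Str.len t
      (st.1 ++ [(st.2, e)], e)) ([], 0)).1

def create_perfect_overlap_pairs_from_tokens_alt (tokens1 : List String) (tokens2 : List String) : List (Int × Int) :=
  let iv1 := pvIntervalsB tokens1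
  let iv2 := pvIntervalsB tokens2
  let idx1 := pvIdxDict iv1
  let idx2 := pvIdxDict iv2
  let cnt2 := iv2.foldl (fun d y => d.insert y (d.getD y 0 + 1)) PySem.Dict.empty
  iv1.foldl (fun out x =>
    let c := cnt2.getD x 0
    if c ≠ 0 then out ++ PySem.List.pyRepeat [(idx1.getD x 0, idx2.getD x 0)] c else out) []

-- ===== PRECONDITION & SPEC =====
def Spec_create_perfect_overlap_pairs_from_tokens (tokens1 : List String) (tokens2 : List String) (out : List (Int × Int)) : Prop := out = create_perfect_overlap_pairs_from_tokens_alt tokens1 tokens2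
instance (tokens1 : List String) (tokens2 : List String) (out : List (Int × Int)) : Decidable (Spec_create_perfect_overlap_pairs_from_tokens tokens1 tokens2 out) := by unfold Spec_create_perfect_overlap_pairs_from_tokens; infer_instance

-- ===== CLAIM (what is proved, stated in full; the proofs are below) =====
def Claim_equal_create_perfect_overlap_pairs_from_tokens : Prop := ∀ (tokens1 : List String) (tokens2 : List String), Dom_create_perfect_overlap_pairs_from_tokens tokens1 tokens2 → Spec_create_perfect_overlap_pairs_from_tokens tokens1 tokens2 (create_perfect_overlap_pairs_from_tokens tokens1 tokens2)

-- ===== LEMMAS AND PROOFS =====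

lemma pvIntervalsB_go (tokens : List String) : ∀ (acc : List (Int × Int)) (s : Int),
    (tokens.foldl (fun (st : List (Int × Int) × Int) t =>
        let e := st.2 + PySem.Str.len t
        (st.1 ++ [(st.2, e)], e)) (acc, s)).1
      = acc ++ ((((tokens.map (fun t => PySem.Str.len t)).scanl (· + ·) s).zip
          (tokens.map (fun t => PySem.Str.len t))).map (fun x => (x.1, x.1 + x.2))) := by
  induction tokens with
  | nil => simp
  | cons t ts ih =>
    intro acc s
    simp only [List.foldl_cons, List.map_cons, List.scanl_cons, List.zip_cons_cons, List.map_cons]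
    rw [ih]
    simp

lemma pvIntervals_eq (tokens : List String) : pvIntervalsB tokens = pvIntervalsA tokens := by
  simpa [pvIntervalsB, pvIntervalsA] using pvIntervalsB_go tokens [] 0

lemma pvInner_eq (d1 d2 : PySem.Dict (Int × Int) Int) (a : Int × Int) (l : List (Int × Int)) :
    ((l.map (fun b => (a, b))).filter (fun x => x.1 == x.2)).map
        (fun p => (d1.getD p.1 0, d2.getD p.2 0))
      = List.replicate (l.count a) (d1.getD a 0, d2.getD a 0) := by
  induction l with
  | nil => simp
  | cons b bs ih =>
    by_cases h : a = b
    · subst h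
      simp [ih, List.replicate_succ]
    · have hb : (a == b) = false := by simp [h]
      have hb' : (b == a) = false := by simp [Ne.symm h]
      simp [hb, hb', List.count_cons, ih]

lemma pvA_flatMap (tokens1 tokens2 : List String) :
    create_perfect_overlap_pairs_from_tokens tokens1 tokens2
      = (pvIntervalsA tokens1).flatMap (fun a =>
          List.replicate ((pvIntervalsA tokens2).count a)
            ((pvIdxDict (pvIntervalsA tokens1)).getD a 0, (pvIdxDict (pvIntervalsA tokens2)).getD a 0)) := by
  unfold create_perfect_overlap_pairs_from_tokens
  simp only [List.filter_flatMap, List.map_flatMap]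
  exact List.flatMap_congr (fun a _ => pvInner_eq _ _ a _)

lemma pvB_flatMap (tokens1 tokens2 : List String) :
    create_perfect_overlap_pairs_from_tokens_alt tokens1 tokens2
      = (pvIntervalsB tokens1).flatMap (fun a =>
          List.replicate ((pvIntervalsB tokens2).count a)
            ((pvIdxDict (pvIntervalsB tokens1)).getD a 0, (pvIdxDict (pvIntervalsB tokens2)).getD a 0)) := by
  unfold create_perfect_overlap_pairs_from_tokens_alt
  dsimp only
  rw [PySem.Dict.foldl_insert_getD_add_one_eq_counter]
  have h : ∀ (out : List (Int × Int)) (x : Int × Int),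
      (if (PySem.Dict.counter (pvIntervalsB tokens2)).getD x 0 ≠ 0 then
        out ++ PySem.List.pyRepeat
          [((pvIdxDict (pvIntervalsB tokens1)).getD x 0, (pvIdxDict (pvIntervalsB tokens2)).getD x 0)]
          ((PySem.Dict.counter (pvIntervalsB tokens2)).getD x 0)
       else out)
      = out ++ List.replicate ((pvIntervalsB tokens2).count x)
          ((pvIdxDict (pvIntervalsB tokens1)).getD x 0, (pvIdxDict (pvIntervalsB tokens2)).getD x 0) := by
    intro out x
    rw [PySem.Dict.getD_counter, PySem.List.pyRepeat_singleton]
    by_cases hc : (pvIntervalsB tokens2).count x = 0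
    · simp [hc]
    · simp [hc]
  simp only [h]
  exact PySem.List.foldl_append_eq_flatMap _ _ _

-- ===== VERDICT (by name: the statement is the Claim_ definition above) =====
theorem create_perfect_overlap_pairs_from_tokens_spec : Claim_equal_create_perfect_overlap_pairs_from_tokens := by
  intro tokens1 tokens2 _
  unfold Spec_create_perfect_overlap_pairs_from_tokens
  rw [pvA_flatMap, pvB_flatMap, pvIntervals_eq, pvIntervals_eq]
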